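-- pv_equiv track=rewrite | github.com/waypope3/envchain | envchain/splitter.py | split_by_prefix
-- ===== SOURCE A (Python) =====
-- from typing import Callable, Dict, List, Optional
--
-- class SplitError(Exception):
--     def __init__(self, message: str) -> None:
--         super().__init__(message)
--
-- def split_by_prefix(
--     env: Dict[str, str],
--     prefixes: List[str],
--     separator: str = "_",
--     strip_prefix: bool = True,
-- ) -> Dict[str, Dict[str, str]]:
--     """Partition *env* into buckets keyed by prefix.
--
--     Keys that match no prefix land in the ``"__other__"`` bucket.
--     """
--     if not isinstance(separator, str) or len(separator) == 0:
--         raise SplitError("separator must be a non-empty string")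
--
--     result: Dict[str, Dict[str, str]] = {p: {} for p in prefixes}
--     result["__other__"] = {}
--
--     for key, value in env.items():
--         matched = False
--         for prefix in prefixes:
--             full_prefix = prefix + separator
--             if key.startswith(full_prefix):
--                 bucket_key = key[len(full_prefix):] if strip_prefix else key
--                 result[prefix][bucket_key] = value
--                 matched = True
--                 break
--         if not matched:
--             result["__other__"][key] = value
--
--     return result
-- ===== SOURCE B (Python) =====
-- from typing import Dict, List
--
--
-- class SplitError(Exception):
--     def __init__(self, message: str) -> None:
--         super().__init__(message)
--
--
-- def split_by_prefix(
--     env: Dict[str, str],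
--     prefixes: List[str],
--     separator: str = "_",
--     strip_prefix: bool = True,
-- ) -> Dict[str, Dict[str, str]]:
--     """Partition *env* into buckets keyed by prefix.
--
--     Instead of scanning the whole prefix list for every key, index the
--     prefixes by their text once; for each key only the substrings ending
--     at an occurrence of *separator* are candidate prefixes, and the one
--     with the smallest position in *prefixes* wins (= first match).
--     """
--     if not isinstance(separator, str) or len(separator) == 0:
--         raise SplitError("separator must be a non-empty string")
--
--     index: Dict[str, int] = {}
--     for i, p in enumerate(prefixes):
--         index.setdefault(p, i)
--
--     result: Dict[str, Dict[str, str]] = {p: {} for p in prefixes}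
--     result["__other__"] = {}
--
--     ls = len(separator)
--     for key, value in env.items():
--         best = None
--         for pos in range(len(key) - ls + 1):
--             if key[pos:pos + ls] == separator:
--                 cand = key[:pos]
--                 i = index.get(cand)
--                 if i is not None and (best is None or i < best[0]):
--                     best = (i, cand)
--         if best is None:
--             result["__other__"][key] = value
--         else:
--             prefix = best[1]
--             bucket_key = key[len(prefix) + ls:] if strip_prefix else key
--             result[prefix][bucket_key] = value
--
--     return result
-- ===== Notes on version B (the rewrite author's own statement) =====
-- stated objective: faster
-- what changed: Instead of testing every prefix against every key (O(n*m*L)), B indexes the prefixes in a dict once and, for each key, checks only the substrings ending at an occurrence of the separator as candidate prefixes, picking the candidate with the smallest position in the prefix list (= A's first match).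
import Mathlib
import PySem

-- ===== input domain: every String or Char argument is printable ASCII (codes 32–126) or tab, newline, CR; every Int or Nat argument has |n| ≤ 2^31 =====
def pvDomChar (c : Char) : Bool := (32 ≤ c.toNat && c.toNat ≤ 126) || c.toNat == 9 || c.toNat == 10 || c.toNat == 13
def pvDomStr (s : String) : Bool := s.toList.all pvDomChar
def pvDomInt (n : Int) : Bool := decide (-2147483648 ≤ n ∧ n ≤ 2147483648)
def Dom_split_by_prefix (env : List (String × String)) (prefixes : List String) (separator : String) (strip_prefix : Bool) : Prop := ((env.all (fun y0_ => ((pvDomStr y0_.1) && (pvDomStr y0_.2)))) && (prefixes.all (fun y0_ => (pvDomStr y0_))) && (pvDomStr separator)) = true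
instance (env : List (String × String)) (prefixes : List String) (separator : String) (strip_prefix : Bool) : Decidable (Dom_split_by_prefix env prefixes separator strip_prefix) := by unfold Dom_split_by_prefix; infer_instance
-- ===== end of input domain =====

-- B (faster, measured) replaces A's per-key scan over all prefixes by a
-- dict index of the prefixes plus a scan over the separator occurrences inside the key
-- (candidate prefixes), picking the candidate with the smallest position in the prefix list.

-- ===== PORT A =====
-- inner 'for prefix in prefixes: … break' loop of A (second component = 'matched')
def pvAGo (key value separator : String) (strip_prefix : Bool) :
    List String → PySem.Dict String (PySem.Dict String String) →
    PySem.Dict String (PySem.Dict String String) × Bool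
  | [], d => (d, false)
  | p :: rest, d =>
      let full_prefix := p ++ separator
      if PySem.Str.startswith key full_prefix then
        let bucket_key := if strip_prefix then PySem.Str.slice key (some (PySem.Str.len full_prefix)) none else key
        -- result[prefix][bucket_key] = value  (prefix is always a key of result)
        (d.modify p PySem.Dict.empty (fun b => b.insert bucket_key value), true)
      else pvAGo key value separator strip_prefix rest d

def split_by_prefix (env : List (String × String)) (prefixes : List String) (separator : String) (strip_prefix : Bool) : List (String × List (String × String)) :=
  if PySem.Str.len separator == 0 then []   -- Python raises SplitError here; excluded by Pre_
  else
    let result := (prefixes.foldl (fun d p => d.insert p PySem.Dict.empty) PySem.Dict.empty).insert "__other__" PySem.Dict.empty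
    let result := env.foldl (fun d kv =>
        let r := pvAGo kv.1 kv.2 separator strip_prefix prefixes d
        if r.2 then r.1
        else r.1.modify "__other__" PySem.Dict.empty (fun b => b.insert kv.1 kv.2)) result
    result.items.map (fun pb => (pb.1, pb.2.items))

-- ===== PORT B =====
-- index: first position of each prefix text ('for i, p in enumerate(prefixes): index.setdefault(p, i)')
def pvIndex (prefixes : List String) : PySem.Dict String Int :=
  (PySem.List.enumerate prefixes).foldl (fun d ip => d.setdefault ip.2 ip.1) PySem.Dict.empty

-- best = (i, cand) over the positions where separator occurs in key ('for pos in range(len(key)-ls+1): …')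
def pvBBest (index : PySem.Dict String Int) (key separator : String) : Option (Int × String) :=
  (PySem.List.pyRange 0 (PySem.Str.len key - PySem.Str.len separator + 1)).foldl
    (fun best pos =>
      if PySem.Str.slice key (some pos) (some (pos + PySem.Str.len separator)) == separator then
        let cand := PySem.Str.slice key none (some pos)
        match index.get? cand with
        | some i =>
            match best with
            | none => some (i, cand)
            | some b => if i < b.1 then some (i, cand) else best
        | none => best
      else best) none

def split_by_prefix_alt (env : List (String × String)) (prefixes : List String) (separator : String) (strip_prefix : Bool) : List (String × List (String × String)) :=
  if PySem.Str.len separator == 0 then []   -- B raises SplitError here too; excluded by Pre_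
  else
    let index := pvIndex prefixes
    let result := (prefixes.foldl (fun d p => d.insert p PySem.Dict.empty) PySem.Dict.empty).insert "__other__" PySem.Dict.empty
    let result := env.foldl (fun d kv =>
        match pvBBest index kv.1 separator with
        | none => d.modify "__other__" PySem.Dict.empty (fun b => b.insert kv.1 kv.2)
        | some ip =>
            let bucket_key := if strip_prefix then PySem.Str.slice kv.1 (some (PySem.Str.len ip.2 + PySem.Str.len separator)) none else kv.1
            d.modify ip.2 PySem.Dict.empty (fun b => b.insert bucket_key kv.2)) result
    result.items.map (fun pb => (pb.1, pb.2.items))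

-- ===== PRECONDITION & SPEC =====
-- Pre_ excludes exactly the inputs where A raises SplitError: an empty separator.
def Pre_split_by_prefix (env : List (String × String)) (prefixes : List String) (separator : String) (strip_prefix : Bool) : Prop := separator ≠ ""
instance (env : List (String × String)) (prefixes : List String) (separator : String) (strip_prefix : Bool) : Decidable (Pre_split_by_prefix env prefixes separator strip_prefix) := by unfold Pre_split_by_prefix; infer_instance

def pvWitness_split_by_prefix : (List (String × String)) × List String × String × Bool :=
  ([("APP_HOST", "h"), ("OTHER", "x")], ["APP", "DB"], "_", true)

def Spec_split_by_prefix (env : List (String × String)) (prefixes : List String) (separator : String) (strip_prefix : Bool) (out : List (String × List (String × String))) : Prop := out = split_by_prefix_alt env prefixes separator strip_prefix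
instance (env : List (String × String)) (prefixes : List String) (separator : String) (strip_prefix : Bool) (out : List (String × List (String × String))) : Decidable (Spec_split_by_prefix env prefixes separator strip_prefix out) := by unfold Spec_split_by_prefix; infer_instance

-- ===== CLAIM (what is proved, stated in full; the proofs are below) =====
def Claim_equal_split_by_prefix : Prop := ∀ (env : List (String × String)) (prefixes : List String) (separator : String) (strip_prefix : Bool), Dom_split_by_prefix env prefixes separator strip_prefix → Pre_split_by_prefix env prefixes separator strip_prefix → Spec_split_by_prefix env prefixes separator strip_prefix (split_by_prefix env prefixes separator strip_prefix)

-- ===== LEMMAS AND PROOFS =====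

-- the per-key selection both programs make, as a mathematical object
def pvMatch (key separator : String) (p : String) : Bool :=
  PySem.Str.startswith key (p ++ separator)

-- A's inner loop is find? over the prefixes
theorem pvAGo_eq (key value separator : String) (strip_prefix : Bool)
    (ps : List String) (d : PySem.Dict String (PySem.Dict String String)) :
    pvAGo key value separator strip_prefix ps d =
      match ps.find? (pvMatch key separator) with
      | some p => (d.modify p PySem.Dict.empty (fun b => b.insert
          (if strip_prefix then PySem.Str.slice key (some (PySem.Str.len (p ++ separator))) none else key) value), true)
      | none => (d, false) := by
  induction ps with
  | nil => rfl
  | cons p rest ih =>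
      by_cases h : pvMatch key separator p = true
      · rw [List.find?_cons_of_pos h]
        unfold pvMatch at h
        simp only [pvAGo]
        rw [if_pos h]
      · rw [List.find?_cons_of_neg h]
        unfold pvMatch at h
        simp only [pvAGo]
        rw [if_neg h]
        exact ih

-- index lookup = first position in the list
theorem pvIndex_aux (p : String) :
    ∀ (l : List String) (n : Int) (d : PySem.Dict String Int),
    ((PySem.List.enumerate l n).foldl (fun d ip => d.setdefault ip.2 ip.1) d).get? p
      = if d.contains p then d.get? p
        else if p ∈ l then some (n + (l.idxOf p : Int)) else none := by
  intro l
  induction l with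
  | nil =>
      intro n d
      simp only [PySem.List.enumerate, List.foldl_nil, List.not_mem_nil, if_false]
      by_cases hc : d.contains p
      · rw [if_pos hc]
      · rw [if_neg hc]
        exact (PySem.Dict.get?_eq_none_iff_contains d p).mpr (by simpa using hc)
  | cons x xs ih =>
      intro n d
      rw [PySem.List.enumerate_cons, List.foldl_cons, ih]
      by_cases hc : d.contains x
      · rw [PySem.Dict.setdefault_of_contains d n hc]
        by_cases hp : p = x
        · subst hp
          simp [hc, List.idxOf_cons_self]
        · simp only [List.mem_cons, hp, false_or, List.idxOf_cons_ne _ (by simpa using (Ne.symm hp))]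
          by_cases hcp : d.contains p
          · simp [hcp]
          · simp only [hcp, if_false]
            by_cases hm : p ∈ xs
            · simp only [hm, if_true]
              exact congrArg some (by omega)
            · simp [hm]
      · rw [PySem.Dict.setdefault_of_not_contains d n (by simpa using hc)]
        by_cases hp : p = x
        · subst hp
          simp only [PySem.Dict.contains_insert, BEq.rfl, Bool.true_or, if_true,
            PySem.Dict.get?_insert_self, List.mem_cons, true_or, if_true, List.idxOf_cons_self,
            hc, if_false]
          norm_num
        · have hne : (p == x) = false := by simpa using hp
          simp only [PySem.Dict.contains_insert, hne, Bool.false_or,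
            PySem.Dict.get?_insert_of_ne d n hp, List.mem_cons, hp, false_or,
            List.idxOf_cons_ne _ (by simpa using (Ne.symm hp))]
          by_cases hcp : d.contains p
          · simp [hcp]
          · simp only [hcp, if_false]
            by_cases hm : p ∈ xs
            · simp only [hm, if_true]
              exact congrArg some (by omega)
            · simp [hm]

theorem pvIndex_get (prefixes : List String) (p : String) :
    (pvIndex prefixes).get? p = if p ∈ prefixes then some ((prefixes.idxOf p : Int)) else none := by
  unfold pvIndex
  rw [pvIndex_aux p prefixes 0 PySem.Dict.empty]
  simp [PySem.Dict.contains_empty]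

-- find? returns the match of strictly smallest index
theorem find?_min {ps : List String} {f : String → Bool} {p : String}
    (h : ps.find? f = some p) :
    p ∈ ps ∧ f p = true ∧ ∀ q ∈ ps, f q = true → q ≠ p → ps.idxOf p < ps.idxOf q := by
  obtain ⟨hfp, as, bs, rfl, hall⟩ := List.find?_eq_some_iff_append.mp h
  have hpas : p ∉ as := fun hm => by simpa [hfp] using hall p hm
  have hidx : (as ++ p :: bs).idxOf p = as.length := by
    rw [List.idxOf_append, if_neg hpas, List.idxOf_cons_self]
    omega
  refine ⟨List.mem_append.mpr (Or.inr List.mem_cons_self), hfp, ?_⟩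
  intro q hq hfq hne
  have hqas : q ∉ as := fun hm => by simpa [hfq] using hall q hm
  rw [hidx, List.idxOf_append, if_neg hqas, List.idxOf_cons_ne _ (Ne.symm hne)]
  omega

-- the candidate test of B, as an Option-valued function of the position
def pvG (index : PySem.Dict String Int) (key separator : String) (pos : Int) : Option (Int × String) :=
  if PySem.Str.slice key (some pos) (some (pos + PySem.Str.len separator)) == separator then
    match index.get? (PySem.Str.slice key none (some pos)) with
    | some i => some (i, PySem.Str.slice key none (some pos))
    | none => none
  else none

theorem pvBBest_eq_fold (index : PySem.Dict String Int) (key separator : String) :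
    pvBBest index key separator =
      (PySem.List.pyRange 0 (PySem.Str.len key - PySem.Str.len separator + 1)).foldl
        (fun best pos =>
          match pvG index key separator pos with
          | none => best
          | some ic => match best with
                       | none => some ic
                       | some b => if ic.1 < b.1 then some ic else best) none := by
  unfold pvBBest
  congr 1
  funext best pos
  unfold pvG
  dsimp only
  split_ifs with h
  · cases index.get? (PySem.Str.slice key none (some pos)) <;> cases best <;> rfl
  · cases best <;> rfl

-- fold-minimum specification
theorem pvFold_spec (g : Int → Option (Int × String)) :
    ∀ (l : List Int) (best : Option (Int × String)),
    (l.foldl (fun best pos =>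
        match g pos with
        | none => best
        | some ic => match best with
                     | none => some ic
                     | some b => if ic.1 < b.1 then some ic else best) best) = best ∨
      (∃ pos ∈ l, (l.foldl (fun best pos =>
        match g pos with
        | none => best
        | some ic => match best with
                     | none => some ic
                     | some b => if ic.1 < b.1 then some ic else best) best) = g pos) := by
  intro l
  induction l with
  | nil => intro best; left; rfl
  | cons pos rest ih =>
      intro best
      simp only [List.foldl_cons]
      rcases ih (match g pos with
        | none => best
        | some ic => match best with
                     | none => some ic
                     | some b => if ic.1 < b.1 then some ic else best) with h | ⟨pos', hmem, h⟩
      · rw [h]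
        cases hg : g pos with
        | none => exact Or.inl rfl
        | some ic =>
            cases best with
            | none => exact Or.inr ⟨pos, List.mem_cons_self, by rw [hg]⟩
            | some b =>
                by_cases hlt : ic.1 < b.1
                · simp only [hlt, if_true]
                  exact Or.inr ⟨pos, List.mem_cons_self, by rw [hg]⟩
                · dsimp only
                  rw [if_neg hlt]
                  left; rfl
      · exact Or.inr ⟨pos', List.mem_cons_of_mem _ hmem, h⟩

theorem pvFold_le (g : Int → Option (Int × String)) :
    ∀ (l : List Int) (best : Option (Int × String)) (i : Int) (c : String),
    ((∃ pos ∈ l, g pos = some (i, c)) ∨ best = some (i, c)) →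
    ∃ j d, (l.foldl (fun best pos =>
        match g pos with
        | none => best
        | some ic => match best with
                     | none => some ic
                     | some b => if ic.1 < b.1 then some ic else best) best) = some (j, d) ∧ j ≤ i := by
  intro l
  induction l with
  | nil =>
      rintro best i c (⟨pos, hpos, _⟩ | hb)
      · exact absurd hpos (List.not_mem_nil)
      · exact ⟨i, c, hb, le_refl i⟩
  | cons pos rest ih =>
      rintro best i c (⟨pos', hpos, hg⟩ | hb)
      · rcases List.mem_cons.mp hpos with rfl | hmem
        · -- witness at the head: the new accumulator is ≤ i, then use ih on it
          simp only [List.foldl_cons, hg]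
          cases best with
          | none =>
              rcases ih (some (i, c)) i c (Or.inr rfl) with ⟨j, d, hfold, hj⟩
              exact ⟨j, d, hfold, hj⟩
          | some b =>
              by_cases hlt : i < b.1
              · simp only [hlt, if_true]
                rcases ih (some (i, c)) i c (Or.inr rfl) with ⟨j, d, hfold, hj⟩
                exact ⟨j, d, hfold, hj⟩
              · simp only [hlt, if_false]
                rcases ih (some b) b.1 b.2 (Or.inr rfl) with ⟨j, d, hfold, hj⟩
                exact ⟨j, d, hfold, le_trans hj (not_lt.mp hlt)⟩
        · rcases ih _ i c (Or.inl ⟨pos', hmem, hg⟩) with ⟨j, d, hfold, hj⟩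
          exact ⟨j, d, by simpa using hfold, hj⟩
      · -- the accumulator already holds (i, c)
        subst hb
        simp only [List.foldl_cons]
        cases hg : g pos with
        | none =>
            rcases ih (some (i, c)) i c (Or.inr rfl) with ⟨j, d, hfold, hj⟩
            exact ⟨j, d, hfold, hj⟩
        | some ic =>
            by_cases hlt : ic.1 < i
            · simp only [hlt, if_true]
              rcases ih (some ic) ic.1 ic.2 (Or.inr rfl) with ⟨j, d, hfold, hj⟩
              exact ⟨j, d, hfold, le_trans hj (le_of_lt hlt)⟩
            · simp only [hlt, if_false]
              rcases ih (some (i, c)) i c (Or.inr rfl) with ⟨j, d, hfold, hj⟩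
              exact ⟨j, d, hfold, hj⟩

-- Str.len as a cast list length
theorem pvStrLen (s : String) : PySem.Str.len s = (s.toList.length : Int) := by
  simp [pysem]

-- splitting a prefix made of two pieces
theorem pvPrefixSplit (t s L : List Char) : t ++ s <+: L ↔ t <+: L ∧ s <+: L.drop t.length := by
  constructor
  · rintro ⟨r, rfl⟩
    refine ⟨⟨s ++ r, by simp⟩, ?_⟩
    refine ⟨r, ?_⟩
    rw [List.append_assoc, List.drop_left]
  · rintro ⟨⟨u, hu⟩, ⟨v, hv⟩⟩
    refine ⟨v, ?_⟩
    subst hu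
    rw [List.drop_left] at hv
    rw [List.append_assoc, hv]

-- B's separator test at position a, read on the character lists
theorem pvCond_iff (key separator : String) (a : Nat) :
    ((PySem.Str.slice key (some (a : Int)) (some ((a : Int) + PySem.Str.len separator)) == separator) = true)
      ↔ separator.toList <+: key.toList.drop a := by
  rw [beq_iff_eq, ← String.toList_inj]
  have hcast : ((a : Int) + PySem.Str.len separator) = ((a + separator.toList.length : Nat) : Int) := by
    rw [pvStrLen]; push_cast; ring
  rw [hcast]
  simp only [pysem, PySem.List.slice_natCast, Nat.add_sub_cancel_left]
  rw [List.prefix_iff_eq_take]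
  exact eq_comm

-- B's candidate at position a is the first a characters of the key
theorem pvCand_toList (key : String) (a : Nat) :
    (PySem.Str.slice key none (some (a : Int))).toList = key.toList.take a := by
  have h : PySem.List.slice key.toList none (some (a : Int)) = List.take ((a : Int)).toNat key.toList :=
    PySem.List.slice_to key.toList (by positivity)
  simp [pysem, h]

-- A's test, read on the character lists
theorem pvMatch_iff (key separator q : String) :
    pvMatch key separator q = true ↔ q.toList ++ separator.toList <+: key.toList := by
  unfold pvMatch
  rw [PySem.Str.startswith_eq, PySem.Chars.startswith_iff, String.toList_append]

-- whatever B's candidate test returns, it is a matching prefix with its first position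
theorem pvG_eq_some (prefixes : List String) (key separator : String)
    (hS : separator.toList ≠ []) (pos : Int) (h0 : 0 ≤ pos) (i : Int) (c : String)
    (h : pvG (pvIndex prefixes) key separator pos = some (i, c)) :
    c ∈ prefixes ∧ pvMatch key separator c = true ∧ i = (prefixes.idxOf c : Int) := by
  have hpos : pos = ((pos.toNat : Nat) : Int) := (Int.toNat_of_nonneg h0).symm
  rw [hpos] at h
  unfold pvG at h
  by_cases hcond : ((PySem.Str.slice key (some ((pos.toNat : Nat) : Int)) (some (((pos.toNat : Nat) : Int) + PySem.Str.len separator)) == separator) = true)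
  · rw [if_pos hcond] at h
    have hdropPre : separator.toList <+: key.toList.drop pos.toNat := (pvCond_iff key separator pos.toNat).mp hcond
    cases hget : (pvIndex prefixes).get? (PySem.Str.slice key none (some ((pos.toNat : Nat) : Int))) with
    | none => rw [hget] at h; exact absurd h (by simp)
    | some i' =>
        rw [hget] at h
        simp only [Option.some.injEq, Prod.mk.injEq] at h
        obtain ⟨hi, hc⟩ := h
        rw [pvIndex_get] at hget
        by_cases hm : (PySem.Str.slice key none (some ((pos.toNat : Nat) : Int))) ∈ prefixes
        · rw [if_pos hm] at hget
          have ha : pos.toNat < key.toList.length := by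
            by_contra hge
            have : key.toList.drop pos.toNat = [] := List.drop_eq_nil_of_le (by omega)
            rw [this] at hdropPre
            exact hS (List.prefix_nil.mp hdropPre)
          have hmatch : pvMatch key separator (PySem.Str.slice key none (some ((pos.toNat : Nat) : Int))) = true := by
            rw [pvMatch_iff, pvCand_toList]
            refine (pvPrefixSplit _ _ _).mpr ⟨List.take_prefix _ _, ?_⟩
            rw [List.length_take, min_eq_left (le_of_lt ha)]
            exact hdropPre
          subst hc
          refine ⟨hm, hmatch, ?_⟩
          rw [← hi]
          exact (Option.some.injEq _ _ ▸ hget).symm ▸ rfl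
        · rw [if_neg hm] at hget; exact absurd hget (by simp)
  · rw [if_neg hcond] at h; exact absurd h (by simp)

-- at the length of a matching prefix, B's candidate test returns that prefix and its position
theorem pvG_at_match (prefixes : List String) (key separator : String) (p : String)
    (hp : pvMatch key separator p = true) (hmem : p ∈ prefixes) :
    pvG (pvIndex prefixes) key separator ((p.toList.length : Nat) : Int) = some ((prefixes.idxOf p : Int), p) := by
  have hpre : p.toList ++ separator.toList <+: key.toList := (pvMatch_iff key separator p).mp hp
  obtain ⟨ht, hd⟩ := (pvPrefixSplit _ _ _).mp hpre
  have hcand : (PySem.Str.slice key none (some ((p.toList.length : Nat) : Int))) = p := by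
    rw [← String.toList_inj, pvCand_toList]
    exact (List.prefix_iff_eq_take.mp ht).symm
  have hcond : ((PySem.Str.slice key (some ((p.toList.length : Nat) : Int)) (some (((p.toList.length : Nat) : Int) + PySem.Str.len separator)) == separator) = true) := by
    rw [pvCond_iff]
    exact hd
  unfold pvG
  rw [if_pos hcond, hcand, pvIndex_get, if_pos hmem]

-- a fold over positions none of which is a candidate keeps its accumulator
theorem pvFold_none (g : Int → Option (Int × String)) (l : List Int)
    (h : ∀ pos ∈ l, g pos = none) :
    (l.foldl (fun best pos =>
        match g pos with
        | none => best
        | some ic => match best with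
                     | none => some ic
                     | some b => if ic.1 < b.1 then some ic else best) none) = none := by
  rcases pvFold_spec g l none with h0 | ⟨pos, hpos, hgp⟩
  · exact h0
  · rw [hgp, h pos hpos]

-- the main per-key lemma: B's candidate minimum IS A's first match
theorem pvBBest_eq_find (prefixes : List String) (key separator : String) (hs : separator ≠ "") :
    pvBBest (pvIndex prefixes) key separator =
      (prefixes.find? (pvMatch key separator)).map (fun p => ((prefixes.idxOf p : Int), p)) := by
  have hS : separator.toList ≠ [] := by
    intro h; exact hs (String.toList_inj.mp (by simpa using h))
  rw [pvBBest_eq_fold]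
  cases hf : prefixes.find? (pvMatch key separator) with
  | none =>
      have hnone : ∀ pos ∈ PySem.List.pyRange 0 (PySem.Str.len key - PySem.Str.len separator + 1),
          pvG (pvIndex prefixes) key separator pos = none := by
        intro pos hpos
        cases hg : pvG (pvIndex prefixes) key separator pos with
        | none => rfl
        | some ic =>
            have h0 : 0 ≤ pos := (PySem.List.mem_pyRange_one.mp hpos).1
            obtain ⟨hmem, hmatch, _⟩ := pvG_eq_some prefixes key separator hS pos h0 ic.1 ic.2 (by rw [hg])
            exact absurd hmatch (by simpa using (List.find?_eq_none.mp hf ic.2 hmem))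
      rw [pvFold_none _ _ hnone]
      rfl
  | some p =>
      obtain ⟨hmem, hfp, hmin⟩ := find?_min hf
      have hpre : p.toList ++ separator.toList <+: key.toList := (pvMatch_iff key separator p).mp hfp
      have hlen : p.toList.length + separator.toList.length ≤ key.toList.length := by
        have := hpre.length_le
        simpa using this
      have hS1 : 1 ≤ separator.toList.length := by
        cases h : separator.toList with
        | nil => exact absurd h hS
        | cons a l => simp
      have hposmem : ((p.toList.length : Int)) ∈ PySem.List.pyRange 0 (PySem.Str.len key - PySem.Str.len separator + 1) := by
        rw [PySem.List.mem_pyRange_one]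
        simp only [pvStrLen]
        omega
      have hg : pvG (pvIndex prefixes) key separator ((p.toList.length : Int)) = some ((prefixes.idxOf p : Int), p) :=
        pvG_at_match prefixes key separator p hfp hmem
      obtain ⟨j, d, hres, hj⟩ := pvFold_le (pvG (pvIndex prefixes) key separator) _ none (prefixes.idxOf p : Int) p
        (Or.inl ⟨_, hposmem, hg⟩)
      rcases pvFold_spec (pvG (pvIndex prefixes) key separator) (PySem.List.pyRange 0 (PySem.Str.len key - PySem.Str.len separator + 1)) none with h0 | ⟨pos, hpos, hgp⟩
      · rw [hres] at h0; exact absurd h0 (by simp)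
      · have hgpos : pvG (pvIndex prefixes) key separator pos = some (j, d) := by rw [← hgp, hres]
        have h0 : 0 ≤ pos := (PySem.List.mem_pyRange_one.mp hpos).1
        obtain ⟨hdm, hdmatch, hdj⟩ := pvG_eq_some prefixes key separator hS pos h0 j d hgpos
        have hdp : d = p := by
          by_contra hne
          have := hmin d hdm hdmatch hne
          omega
        subst hdp
        rw [hres, Option.map_some]
        exact congrArg some (by rw [hdj])

theorem split_by_prefix_spec' (env : List (String × String)) (prefixes : List String)
    (separator : String) (strip_prefix : Bool) (hs : separator ≠ "") :
    split_by_prefix env prefixes separator strip_prefix = split_by_prefix_alt env prefixes separator strip_prefix := by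
  have hne : separator.toList ≠ [] := fun h => hs (String.toList_inj.mp (by simpa using h))
  have hlen : (PySem.Str.len separator == 0) = false := by
    rw [pvStrLen]
    simp only [beq_eq_false_iff_ne, ne_eq, Nat.cast_eq_zero]
    exact fun h => hne (List.length_eq_zero_iff.mp h)
  unfold split_by_prefix split_by_prefix_alt
  rw [hlen]
  dsimp only
  congr 1
  congr 1
  congr 1
  apply PySem.List.foldl_congr_mem
  intro d kv _
  rw [pvAGo_eq, pvBBest_eq_find prefixes kv.1 separator hs]
  cases prefixes.find? (pvMatch kv.1 separator) with
  | none => rfl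
  | some p =>
      dsimp only
      rw [PySem.Str.len_append]
      rfl

-- ===== VERDICT (by name: the statement is the Claim_ definition above) =====
theorem split_by_prefix_spec : Claim_equal_split_by_prefix := by
  intro env prefixes separator strip_prefix _ hpre
  exact split_by_prefix_spec' env prefixes separator strip_prefix hpre
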